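-- pv_equiv track=rewrite | github.com/eurstudent/Computer-Science-Paper | main_LSH_GRIDSEARCH.py | longestStringInList
-- ===== SOURCE A (Python) =====
-- def alphaNumericList(listToClean):
--     cleanedList = []
--     for word in listToClean:
--         if (any(chr.isalpha() for chr in word) and any(chr.isdigit() for chr in word)) == True:
--             cleanedList.append(word)
--     return cleanedList
--
-- def longestStringInList(titleList):
--     listWords = ["DIAG","HERTZ","INCH","POUNDS"]
--     titleListAlphaNumeric = alphaNumericList(titleList)
--     for ls in listWords:
--         titleListAlphaNumeric = [x for x in titleListAlphaNumeric if ls not in x]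
--     if titleListAlphaNumeric:
--         longest_string = max(titleListAlphaNumeric, key=len)
--         if len(longest_string) <= 5:
--             longest_string = ""
--     else:
--         longest_string = ""
--     return longest_string
-- ===== SOURCE B (Python) =====
-- def longestStringInList(titleList):
--     banned = ("DIAG", "HERTZ", "INCH", "POUNDS")
--     best = ""
--     for word in titleList:
--         if (len(word) > len(best)
--                 and any(c.isalpha() for c in word)
--                 and any(c.isdigit() for c in word)
--                 and not any(b in word for b in banned)):
--             best = word
--     return best if len(best) > 5 else ""
-- ===== Notes on version B (the rewrite author's own statement) =====
-- stated objective: simpler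
-- what changed: Replaces the helper function plus four successive filter comprehensions plus max(key=len) with one fused pass over titleList that keeps a running best, updating only on strictly greater length (preserving max's first-wins tie rule), and applies the >5 length cut at the end.
import Mathlib
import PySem

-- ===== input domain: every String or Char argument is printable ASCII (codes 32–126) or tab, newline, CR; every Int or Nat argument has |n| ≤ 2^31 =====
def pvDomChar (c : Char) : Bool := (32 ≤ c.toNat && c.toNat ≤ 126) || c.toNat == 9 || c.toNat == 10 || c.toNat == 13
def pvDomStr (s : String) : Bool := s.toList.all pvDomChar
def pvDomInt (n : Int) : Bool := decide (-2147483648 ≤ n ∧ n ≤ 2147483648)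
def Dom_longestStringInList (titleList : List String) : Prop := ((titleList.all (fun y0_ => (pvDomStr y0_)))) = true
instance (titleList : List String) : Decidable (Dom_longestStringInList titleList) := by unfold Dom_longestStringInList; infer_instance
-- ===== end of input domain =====

-- B is one fused pass keeping a running best word; A builds the filtered list in five passes and takes max(key=len).

-- ===== PORT A =====
-- any(chr.isalpha() for chr in word) and any(chr.isdigit() for chr in word)
def pvAlnumCond (word : String) : Bool :=
  (word.toList.any (fun c => PySem.Chars.strIsalpha [c])) &&
  (word.toList.any (fun c => PySem.Chars.strIsdigit [c]))

def alphaNumericList (listToClean : List String) : List String :=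
  listToClean.foldl (fun cleanedList word =>
    if pvAlnumCond word then cleanedList ++ [word] else cleanedList) []

def longestStringInList (titleList : List String) : String :=
  let listWords : List String := ["DIAG", "HERTZ", "INCH", "POUNDS"]
  let titleListAlphaNumeric := alphaNumericList titleList
  let titleListAlphaNumeric :=
    listWords.foldl (fun acc ls => acc.filter (fun x => !PySem.Str.isIn ls x)) titleListAlphaNumeric
  if titleListAlphaNumeric ≠ [] then
    match PySem.List.max? titleListAlphaNumeric PySem.Str.len with
    | some longest_string => if PySem.Str.len longest_string ≤ 5 then "" else longest_string
    | none => ""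
  else ""

-- ===== PORT B =====
-- the fused qualification test of Source B's single if
def pvQualifies (word : String) : Bool :=
  (word.toList.any (fun c => PySem.Chars.strIsalpha [c])) &&
  (word.toList.any (fun c => PySem.Chars.strIsdigit [c])) &&
  !((["DIAG", "HERTZ", "INCH", "POUNDS"] : List String).any (fun b => PySem.Str.isIn b word))

def longestStringInList_alt (titleList : List String) : String :=
  let best := titleList.foldl (fun best word =>
    if PySem.Str.len best < PySem.Str.len word && pvQualifies word then word else best) ""
  if 5 < PySem.Str.len best then best else ""

-- ===== PRECONDITION & SPEC =====
def Spec_longestStringInList (titleList : List String) (out : String) : Prop := out = longestStringInList_alt titleList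
instance (titleList : List String) (out : String) : Decidable (Spec_longestStringInList titleList out) := by unfold Spec_longestStringInList; infer_instance

-- ===== CLAIM (what is proved, stated in full; the proofs are below) =====
def Claim_equal_longestStringInList : Prop := ∀ (titleList : List String), Dom_longestStringInList titleList → Spec_longestStringInList titleList (longestStringInList titleList)

-- ===== LEMMAS AND PROOFS =====

-- A's pipeline builds exactly the filter by the fused predicate
lemma pipeline_eq_filter (titleList : List String) :
    (["DIAG", "HERTZ", "INCH", "POUNDS"] : List String).foldl
      (fun acc ls => acc.filter (fun x => !PySem.Str.isIn ls x)) (alphaNumericList titleList)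
      = titleList.filter pvQualifies := by
  have h0 : alphaNumericList titleList = titleList.filter pvAlnumCond := by
    simpa using PySem.List.foldl_append_if pvAlnumCond id titleList []
  rw [h0]
  simp only [List.foldl, List.filter_filter]
  apply List.filter_congr
  intro x _
  unfold pvQualifies pvAlnumCond
  cases word₁ : x.toList.any (fun c => PySem.Chars.strIsalpha [c]) <;>
  cases word₂ : x.toList.any (fun c => PySem.Chars.strIsdigit [c]) <;>
  cases h1 : PySem.Str.isIn "DIAG" x <;> cases h2 : PySem.Str.isIn "HERTZ" x <;>
  cases h3 : PySem.Str.isIn "INCH" x <;> cases h4 : PySem.Str.isIn "POUNDS" x <;>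
  simp_all

-- a qualifying word is nonempty
lemma qualifies_len_pos {w : String} (h : pvQualifies w = true) : 0 < PySem.Str.len w := by
  unfold pvQualifies at h
  simp only [Bool.and_eq_true, List.any_eq_true] at h
  obtain ⟨⟨⟨c, hc, _⟩, _⟩, _⟩ := h
  have : w.toList ≠ [] := by intro hnil; rw [hnil] at hc; exact absurd hc (List.not_mem_nil)
  simp [PySem.Str.len]
  exact List.length_pos_iff.mpr this

-- B's fold over titleList equals the plain running-max fold over the filtered list
lemma fold_eq_fold_filter (titleList : List String) (b : String) :
    titleList.foldl (fun best word =>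
      if PySem.Str.len best < PySem.Str.len word && pvQualifies word then word else best) b
    = (titleList.filter pvQualifies).foldl (fun best word =>
      if PySem.Str.len best < PySem.Str.len word then word else best) b := by
  induction titleList generalizing b with
  | nil => rfl
  | cons w t ih =>
    rw [List.foldl_cons, List.filter_cons]
    by_cases hq : pvQualifies w = true
    · rw [if_pos hq]
      simp only [List.foldl_cons, hq, Bool.and_true, decide_eq_true_eq]
      exact ih _
    · rw [if_neg (by simp [hq])]
      simp only [hq, Bool.false_eq_true, if_false]
      exact ih _

-- max? on a nonempty list is the running-max fold seeded with the head (first extremal wins)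
lemma max?_from_some (t : List String) (m : String) :
    PySem.List.max? (m :: t) PySem.Str.len
      = some (t.foldl (fun best word =>
          if PySem.Str.len best < PySem.Str.len word then word else best) m) := by
  induction t generalizing m with
  | nil => rfl
  | cons x t ih =>
    simp only [PySem.List.max?, List.foldl_cons] at ih ⊢
    by_cases h : PySem.Str.len m < PySem.Str.len x
    · simp only [h, if_true] at ih ⊢
      exact ih x
    · simp only [h, if_false] at ih ⊢
      exact ih m

-- the running-max fold from "" on a list of nonempty strings is max? (first extremal)
lemma max?_eq_fold (L : List String) (hpos : ∀ x ∈ L, 0 < PySem.Str.len x) (hne : L ≠ []) :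
    PySem.List.max? L PySem.Str.len
      = some (L.foldl (fun best word =>
          if PySem.Str.len best < PySem.Str.len word then word else best) "") := by
  cases L with
  | nil => exact absurd rfl hne
  | cons w t =>
    have h0 : PySem.Str.len "" < PySem.Str.len w := by
      simpa using hpos w List.mem_cons_self
    rw [max?_from_some t w, List.foldl_cons, if_pos h0]

-- ===== VERDICT (by name: the statement is the Claim_ definition above) =====
theorem longestStringInList_spec : Claim_equal_longestStringInList := by
  intro titleList _
  simp only [Spec_longestStringInList, longestStringInList, longestStringInList_alt,
    pipeline_eq_filter, fold_eq_fold_filter]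
  set L := titleList.filter pvQualifies with hL
  by_cases hne : L = []
  · simp [hne]
  · have hpos : ∀ x ∈ L, 0 < PySem.Str.len x := by
      intro x hx
      exact qualifies_len_pos (List.of_mem_filter hx)
    rw [max?_eq_fold L hpos hne, if_pos hne]
    set b := L.foldl (fun best word =>
      if PySem.Str.len best < PySem.Str.len word then word else best) "" with hb
    show (if PySem.Str.len b ≤ 5 then "" else b) = (if 5 < PySem.Str.len b then b else "")
    by_cases h5 : PySem.Str.len b ≤ 5
    · rw [if_pos h5, if_neg (not_lt.mpr h5)]
    · rw [if_neg h5, if_pos (lt_of_not_ge h5)]
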